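-- pv_equiv track=rewrite | github.com/amanyadav5325/Password-Strength-Analyzer- | wordlist_generator.py | _analyze_charset_distribution
-- ===== SOURCE A (Python) =====
-- from typing import List, Set, Dict, Any
--
-- def _analyze_charset_distribution(wordlist: List[str]) -> Dict[str, int]:
--     """Analyze character set distribution in wordlist"""
--     distribution = {
--         'lowercase_only': 0,
--         'uppercase_only': 0,
--         'mixed_case': 0,
--         'with_numbers': 0,
--         'with_symbols': 0
--     }
--
--     for word in wordlist:
--         has_lower = any(c.islower() for c in word)
--         has_upper = any(c.isupper() for c in word)
--         has_digit = any(c.isdigit() for c in word)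
--         has_symbol = any(not c.isalnum() for c in word)
--
--         if has_lower and not has_upper:
--             distribution['lowercase_only'] += 1
--         elif has_upper and not has_lower:
--             distribution['uppercase_only'] += 1
--         elif has_lower and has_upper:
--             distribution['mixed_case'] += 1
--
--         if has_digit:
--             distribution['with_numbers'] += 1
--         if has_symbol:
--             distribution['with_symbols'] += 1
--
--     return distribution
-- ===== SOURCE B (Python) =====
-- _LOWER = frozenset('abcdefghijklmnopqrstuvwxyz')
-- _UPPER = frozenset('ABCDEFGHIJKLMNOPQRSTUVWXYZ')
-- _DIGIT = frozenset('0123456789')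
-- _ALNUM = _LOWER | _UPPER | _DIGIT
--
--
-- def _signature(word):
--     """4-bit charset signature of a word, computed by set algebra on its distinct characters."""
--     chars = set(word)
--     return ((0 if chars.isdisjoint(_LOWER) else 1)
--             + (0 if chars.isdisjoint(_UPPER) else 2)
--             + (0 if chars.isdisjoint(_DIGIT) else 4)
--             + (0 if chars <= _ALNUM else 8))
--
--
-- def _analyze_charset_distribution(wordlist):
--     """Analyze character set distribution: histogram the 16 possible charset
--     signatures in one pass, then derive the five categories as bucket sums."""
--     sig = [0] * 16
--     for word in wordlist:
--         sig[_signature(word)] += 1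
--     return {
--         'lowercase_only': sum(sig[s] for s in range(16) if s & 3 == 1),
--         'uppercase_only': sum(sig[s] for s in range(16) if s & 3 == 2),
--         'mixed_case':     sum(sig[s] for s in range(16) if s & 3 == 3),
--         'with_numbers':   sum(sig[s] for s in range(16) if s & 4),
--         'with_symbols':   sum(sig[s] for s in range(16) if s & 8),
--     }
-- ===== Notes on version B (the rewrite author's own statement) =====
-- stated objective: faster
-- what changed: B replaces A's four per-word any() generator scans and five dict-in-place counters with a different algorithm: it classifies each word by a 4-bit charset signature computed via set algebra (disjointness/subset tests of set(word) against fixed character-class sets), histograms the signatures into 16 buckets in one pass, and derives the five categories afterwards as bucket sums over the histogram.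
import Mathlib
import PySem

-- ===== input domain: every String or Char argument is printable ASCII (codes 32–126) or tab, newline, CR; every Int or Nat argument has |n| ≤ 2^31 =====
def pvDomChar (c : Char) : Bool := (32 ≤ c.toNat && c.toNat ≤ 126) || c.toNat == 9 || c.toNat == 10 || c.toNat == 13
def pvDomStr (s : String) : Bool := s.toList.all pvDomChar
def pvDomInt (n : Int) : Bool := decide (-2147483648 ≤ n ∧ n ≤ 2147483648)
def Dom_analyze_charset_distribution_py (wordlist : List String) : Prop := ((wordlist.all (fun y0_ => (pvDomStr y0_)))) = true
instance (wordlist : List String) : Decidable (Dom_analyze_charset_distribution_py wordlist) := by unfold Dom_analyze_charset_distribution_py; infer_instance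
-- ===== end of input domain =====

-- B replaces A's per-word any() scans and dict-in-place increments with a different algorithm:
-- it histograms each word's 4-bit charset signature (computed by set algebra against fixed
-- character-class sets) into 16 buckets, then derives the five categories as bucket sums.
-- Equivalence is claimed on the printable-ASCII domain Dom (on which the set classes coincide
-- with Python's str.islower/isupper/isdigit/isalnum).

-- ===== PORT A =====
def pvStepA (d : PySem.Dict String Int) (word : String) : PySem.Dict String Int :=
  let has_lower := word.toList.any PySem.Chars.islower
  let has_upper := word.toList.any PySem.Chars.isupper
  let has_digit := word.toList.any PySem.Chars.isdigit
  let has_symbol := word.toList.any (fun c => ! PySem.Chars.isalnum c)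
  let d :=
    if has_lower && !has_upper then d.modify "lowercase_only" 0 (· + 1)
    else if has_upper && !has_lower then d.modify "uppercase_only" 0 (· + 1)
    else if has_lower && has_upper then d.modify "mixed_case" 0 (· + 1)
    else d
  let d := if has_digit then d.modify "with_numbers" 0 (· + 1) else d
  let d := if has_symbol then d.modify "with_symbols" 0 (· + 1) else d
  d

def analyze_charset_distribution_py (wordlist : List String) : List (String × Int) :=
  (wordlist.foldl pvStepA
    (PySem.Dict.ofList [("lowercase_only", 0), ("uppercase_only", 0), ("mixed_case", 0),
                        ("with_numbers", 0), ("with_symbols", 0)])).items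

-- ===== PORT B =====
-- the module-level character-class set constants of Source B
def pvLOWER : PySem.Set Char := PySem.Set.ofList
  ['a','b','c','d','e','f','g','h','i','j','k','l','m','n','o','p','q','r','s','t','u','v','w','x','y','z']
def pvUPPER : PySem.Set Char := PySem.Set.ofList
  ['A','B','C','D','E','F','G','H','I','J','K','L','M','N','O','P','Q','R','S','T','U','V','W','X','Y','Z']
def pvDIGIT : PySem.Set Char := PySem.Set.ofList ['0','1','2','3','4','5','6','7','8','9']
def pvALNUM : PySem.Set Char := PySem.Set.union (PySem.Set.union pvLOWER pvUPPER) pvDIGIT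

def pvSignature (word : String) : Int :=
  let chars := PySem.Set.ofList word.toList
  (if PySem.Set.isdisjoint chars pvLOWER then 0 else 1)
  + (if PySem.Set.isdisjoint chars pvUPPER then 0 else 2)
  + (if PySem.Set.isdisjoint chars pvDIGIT then 0 else 4)
  + (if PySem.Set.issubset chars pvALNUM then 0 else 8)

-- sig[_signature(word)] += 1
def pvBump (sig : List Int) (word : String) : List Int :=
  PySem.List.pySetD sig (pvSignature word) (PySem.List.pyGetD sig (pvSignature word) 0 + 1)

-- sum(sig[s] for s in range(16) if p(s))
def pvBucketSum (sig : List Int) (p : Int → Bool) : Int :=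
  (((PySem.List.pyRange 0 16 1).filter p).map (fun s => PySem.List.pyGetD sig s 0)).sum

def analyze_charset_distribution_py_alt (wordlist : List String) : List (String × Int) :=
  let sig := wordlist.foldl pvBump (List.replicate 16 (0 : Int))
  [("lowercase_only", pvBucketSum sig (fun s => PySem.Int.band s 3 == 1)),
   ("uppercase_only", pvBucketSum sig (fun s => PySem.Int.band s 3 == 2)),
   ("mixed_case",     pvBucketSum sig (fun s => PySem.Int.band s 3 == 3)),
   ("with_numbers",   pvBucketSum sig (fun s => PySem.Int.band s 4 != 0)),
   ("with_symbols",   pvBucketSum sig (fun s => PySem.Int.band s 8 != 0))]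

-- ===== PRECONDITION & SPEC =====
def Spec_analyze_charset_distribution_py (wordlist : List String) (out : List (String × Int)) : Prop := out = analyze_charset_distribution_py_alt wordlist
instance (wordlist : List String) (out : List (String × Int)) : Decidable (Spec_analyze_charset_distribution_py wordlist out) := by unfold Spec_analyze_charset_distribution_py; infer_instance

-- ===== CLAIM (what is proved, stated in full; the proofs are below) =====
def Claim_equal_analyze_charset_distribution_py : Prop := ∀ (wordlist : List String), Dom_analyze_charset_distribution_py wordlist → Spec_analyze_charset_distribution_py wordlist (analyze_charset_distribution_py wordlist)

-- ===== LEMMAS AND PROOFS =====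
set_option maxRecDepth 8192

-- the Dict A maintains, expressed through B's bucket sums of a histogram h
def pvD (h : List Int) : PySem.Dict String Int :=
  PySem.Dict.mk
    [("lowercase_only", pvBucketSum h (fun s => PySem.Int.band s 3 == 1)),
     ("uppercase_only", pvBucketSum h (fun s => PySem.Int.band s 3 == 2)),
     ("mixed_case",     pvBucketSum h (fun s => PySem.Int.band s 3 == 3)),
     ("with_numbers",   pvBucketSum h (fun s => PySem.Int.band s 4 != 0)),
     ("with_symbols",   pvBucketSum h (fun s => PySem.Int.band s 8 != 0))]

-- membership in the literal class lists is exactly the PySem character predicate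
lemma pvLower_contains (c : Char) : List.contains (pvLOWER : List Char) c = PySem.Chars.islower c := by
  rw [show (pvLOWER : List Char) = ['a','b','c','d','e','f','g','h','i','j','k','l','m','n','o','p','q','r','s','t','u','v','w','x','y','z'] from by decide]
  by_cases hc : PySem.Chars.islower c = true
  · rw [hc]
    have hb : 97 ≤ c.toNat ∧ c.toNat ≤ 122 := by
      simp only [PySem.Chars.islower, Bool.and_eq_true, decide_eq_true_eq, Char.le_def,
        UInt32.le_iff_toNat_le, Char.toNat] at hc ⊢
      exact hc
    obtain ⟨h1, h2⟩ := hb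
    have hofn : c = Char.ofNat c.toNat := (Char.ofNat_toNat c).symm
    simp only [List.contains_eq_mem, decide_eq_true_eq]
    interval_cases h : c.toNat <;> rw [hofn] <;> decide
  · rw [Bool.not_eq_true] at hc
    rw [hc]
    simp only [List.contains_eq_mem, decide_eq_false_iff_not]
    intro hmem
    fin_cases hmem <;> simp [PySem.Chars.islower] at hc

lemma pvUpper_contains (c : Char) : List.contains (pvUPPER : List Char) c = PySem.Chars.isupper c := by
  rw [show (pvUPPER : List Char) = ['A','B','C','D','E','F','G','H','I','J','K','L','M','N','O','P','Q','R','S','T','U','V','W','X','Y','Z'] from by decide]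
  by_cases hc : PySem.Chars.isupper c = true
  · rw [hc]
    have hb : 65 ≤ c.toNat ∧ c.toNat ≤ 90 := by
      simp only [PySem.Chars.isupper, Bool.and_eq_true, decide_eq_true_eq, Char.le_def,
        UInt32.le_iff_toNat_le, Char.toNat] at hc ⊢
      exact hc
    obtain ⟨h1, h2⟩ := hb
    have hofn : c = Char.ofNat c.toNat := (Char.ofNat_toNat c).symm
    simp only [List.contains_eq_mem, decide_eq_true_eq]
    interval_cases h : c.toNat <;> rw [hofn] <;> decide
  · rw [Bool.not_eq_true] at hc
    rw [hc]
    simp only [List.contains_eq_mem, decide_eq_false_iff_not]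
    intro hmem
    fin_cases hmem <;> simp [PySem.Chars.isupper] at hc

lemma pvDigit_contains (c : Char) : List.contains (pvDIGIT : List Char) c = PySem.Chars.isdigit c := by
  rw [show (pvDIGIT : List Char) = ['0','1','2','3','4','5','6','7','8','9'] from by decide]
  by_cases hc : PySem.Chars.isdigit c = true
  · rw [hc]
    have hb : 48 ≤ c.toNat ∧ c.toNat ≤ 57 := by
      simp only [PySem.Chars.isdigit, Bool.and_eq_true, decide_eq_true_eq, Char.le_def,
        UInt32.le_iff_toNat_le, Char.toNat] at hc ⊢
      exact hc
    obtain ⟨h1, h2⟩ := hb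
    have hofn : c = Char.ofNat c.toNat := (Char.ofNat_toNat c).symm
    simp only [List.contains_eq_mem, decide_eq_true_eq]
    interval_cases h : c.toNat <;> rw [hofn] <;> decide
  · rw [Bool.not_eq_true] at hc
    rw [hc]
    simp only [List.contains_eq_mem, decide_eq_false_iff_not]
    intro hmem
    fin_cases hmem <;> simp [PySem.Chars.isdigit] at hc

lemma pvAlnum_contains (c : Char) : List.contains (pvALNUM : List Char) c = PySem.Chars.isalnum c := by
  rw [show (pvALNUM : List Char)
      = (pvLOWER : List Char) ++ (pvUPPER : List Char) ++ (pvDIGIT : List Char) from by decide]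
  simp only [List.contains_append, pvLower_contains, pvUpper_contains, pvDigit_contains]
  simp [PySem.Chars.isalnum, PySem.Chars.isalpha, Bool.or_comm]

-- any/all over set(word) equal any/all over the word's characters
lemma pvAny_ofList (cs : List Char) (p : Char → Bool) : (PySem.Set.ofList cs).any p = cs.any p := by
  by_cases h : cs.any p = true
  · rw [h]
    obtain ⟨x, hx, hp⟩ := List.any_eq_true.mp h
    exact List.any_eq_true.mpr ⟨x, (PySem.Set.mem_ofList cs x).mpr hx, hp⟩
  · rw [Bool.not_eq_true] at h
    rw [h]
    refine List.any_eq_false.mpr ?_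
    intro x hx
    exact List.any_eq_false.mp h x ((PySem.Set.mem_ofList cs x).mp hx)

lemma pvAll_ofList (cs : List Char) (p : Char → Bool) : (PySem.Set.ofList cs).all p = cs.all p := by
  rw [List.all_eq_not_any_not, List.all_eq_not_any_not, pvAny_ofList]

-- B's set tests in terms of A's four flags
lemma pvFlag_lower (cs : List Char) :
    PySem.Set.isdisjoint (PySem.Set.ofList cs) pvLOWER = !cs.any PySem.Chars.islower := by
  simp only [PySem.Set.isdisjoint, PySem.Set.contains, pvLower_contains, pvAny_ofList]

lemma pvFlag_upper (cs : List Char) :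
    PySem.Set.isdisjoint (PySem.Set.ofList cs) pvUPPER = !cs.any PySem.Chars.isupper := by
  simp only [PySem.Set.isdisjoint, PySem.Set.contains, pvUpper_contains, pvAny_ofList]

lemma pvFlag_digit (cs : List Char) :
    PySem.Set.isdisjoint (PySem.Set.ofList cs) pvDIGIT = !cs.any PySem.Chars.isdigit := by
  simp only [PySem.Set.isdisjoint, PySem.Set.contains, pvDigit_contains, pvAny_ofList]

lemma pvFlag_alnum (cs : List Char) :
    PySem.Set.issubset (PySem.Set.ofList cs) pvALNUM = !cs.any (fun c => ! PySem.Chars.isalnum c) := by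
  simp only [PySem.Set.issubset, PySem.Set.contains, pvAlnum_contains]
  rw [pvAll_ofList, List.all_eq_not_any_not]

lemma pvFilter1 : (PySem.List.pyRange 0 16 1).filter (fun s => PySem.Int.band s 3 == 1) = [1,5,9,13] := by decide
lemma pvFilter2 : (PySem.List.pyRange 0 16 1).filter (fun s => PySem.Int.band s 3 == 2) = [2,6,10,14] := by decide
lemma pvFilter3 : (PySem.List.pyRange 0 16 1).filter (fun s => PySem.Int.band s 3 == 3) = [3,7,11,15] := by decide
lemma pvFilter4 : (PySem.List.pyRange 0 16 1).filter (fun s => PySem.Int.band s 4 != 0) = [4,5,6,7,12,13,14,15] := by decide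
lemma pvFilter5 : (PySem.List.pyRange 0 16 1).filter (fun s => PySem.Int.band s 8 != 0) = [8,9,10,11,12,13,14,15] := by decide

-- one A-step on pvD h is one B-step on the 16-bucket histogram
lemma pvStep_eq (w : String)
    (x0 x1 x2 x3 x4 x5 x6 x7 x8 x9 x10 x11 x12 x13 x14 x15 : Int) :
    pvStepA (pvD [x0,x1,x2,x3,x4,x5,x6,x7,x8,x9,x10,x11,x12,x13,x14,x15]) w
    = pvD (pvBump [x0,x1,x2,x3,x4,x5,x6,x7,x8,x9,x10,x11,x12,x13,x14,x15] w) := by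
  unfold pvStepA pvBump pvSignature
  simp only [pvFlag_lower, pvFlag_upper, pvFlag_digit, pvFlag_alnum]
  rcases Bool.eq_false_or_eq_true (w.toList.any PySem.Chars.islower) with hL | hL <;>
  rcases Bool.eq_false_or_eq_true (w.toList.any PySem.Chars.isupper) with hU | hU <;>
  rcases Bool.eq_false_or_eq_true (w.toList.any PySem.Chars.isdigit) with hD | hD <;>
  rcases Bool.eq_false_or_eq_true (w.toList.any (fun c => ! PySem.Chars.isalnum c)) with hS | hS <;>
    simp only [hL, hU, hD, hS, Bool.not_true, Bool.not_false, if_true, Bool.and_true,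
      Bool.and_false] <;>
    simp [pvD, pvBucketSum, pvFilter1, pvFilter2, pvFilter3, pvFilter4, pvFilter5,
      PySem.List.pySetD, PySem.List.pySet?, PySem.List.pyIdx?, PySem.List.pyGetD,
      PySem.List.pyGet?, PySem.Dict.modify, PySem.Dict.getD, PySem.Dict.get?,
      PySem.Dict.insert, PySem.Dict.contains] <;>
    omega

lemma pvStep_eq' (w : String) (h : List Int) (hl : h.length = 16) :
    pvStepA (pvD h) w = pvD (pvBump h w) := by
  rcases h with _|⟨x0,h⟩
  · simp at hl
  rcases h with _|⟨x1,h⟩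
  · simp at hl
  rcases h with _|⟨x2,h⟩
  · simp at hl
  rcases h with _|⟨x3,h⟩
  · simp at hl
  rcases h with _|⟨x4,h⟩
  · simp at hl
  rcases h with _|⟨x5,h⟩
  · simp at hl
  rcases h with _|⟨x6,h⟩
  · simp at hl
  rcases h with _|⟨x7,h⟩
  · simp at hl
  rcases h with _|⟨x8,h⟩
  · simp at hl
  rcases h with _|⟨x9,h⟩
  · simp at hl
  rcases h with _|⟨x10,h⟩
  · simp at hl
  rcases h with _|⟨x11,h⟩
  · simp at hl
  rcases h with _|⟨x12,h⟩
  · simp at hl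
  rcases h with _|⟨x13,h⟩
  · simp at hl
  rcases h with _|⟨x14,h⟩
  · simp at hl
  rcases h with _|⟨x15,h⟩
  · simp at hl
  rcases h with _|⟨y,t⟩
  · exact pvStep_eq w x0 x1 x2 x3 x4 x5 x6 x7 x8 x9 x10 x11 x12 x13 x14 x15
  · simp at hl

lemma pvFold (ws : List String) : ∀ (h : List Int), h.length = 16 →
    ws.foldl pvStepA (pvD h) = pvD (ws.foldl pvBump h) := by
  induction ws with
  | nil => intro h _; rfl
  | cons w ws ih =>
      intro h hl
      rw [List.foldl_cons, List.foldl_cons, pvStep_eq' w h hl]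
      exact ih _ (by simp [pvBump, PySem.List.length_pySetD, hl])

-- ===== VERDICT (by name: the statement is the Claim_ definition above) =====
theorem analyze_charset_distribution_py_spec : Claim_equal_analyze_charset_distribution_py := by
  intro wordlist _
  unfold Spec_analyze_charset_distribution_py analyze_charset_distribution_py
    analyze_charset_distribution_py_alt
  rw [show (PySem.Dict.ofList [("lowercase_only", (0 : Int)), ("uppercase_only", 0), ("mixed_case", 0),
        ("with_numbers", 0), ("with_symbols", 0)]) = pvD (List.replicate 16 (0 : Int)) from by decide,
      pvFold wordlist (List.replicate 16 (0 : Int)) (by simp)]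
  rfl
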